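-- pv_equiv track=rewrite | github.com/icework/youtube-exercise-summary | pipeline/vision.py | _count_descending_pairs
-- ===== SOURCE A (Python) =====
-- def _count_descending_pairs(numbers: list[int | None]) -> tuple[int, int, int]:
--     descending_pairs = 0
--     reset_hits = 0
--     longest_streak = 0
--     current_streak = 0
--     previous_number: int | None = None
--     for number in numbers:
--         if not isinstance(number, int):
--             current_streak = 0
--             previous_number = None
--             continue
--         if previous_number is not None:
--             difference = previous_number - number
--             if 1 <= difference <= 2:
--                 descending_pairs += 1
--                 current_streak += 1
--             elif number >= previous_number + 6 or (previous_number <= 3 and number >= 28):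
--                 reset_hits += 1
--                 current_streak = 0
--             else:
--                 current_streak = 0
--         previous_number = number
--         longest_streak = max(longest_streak, current_streak)
--     return descending_pairs, reset_hits, longest_streak
-- ===== SOURCE B (Python) =====
-- def _split_segments(numbers):
--     segs = []
--     cur = []
--     for x in numbers:
--         if isinstance(x, int):
--             cur.append(x)
--         else:
--             if cur:
--                 segs.append(cur)
--             cur = []
--     if cur:
--         segs.append(cur)
--     return segs
--
--
-- def _scan_segment(state, seg):
--     descending_pairs, reset_hits, longest_streak = state
--     streak = 0
--     for prev, cur in zip(seg, seg[1:]):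
--         if 1 <= prev - cur <= 2:
--             descending_pairs += 1
--             streak += 1
--         elif cur >= prev + 6 or (prev <= 3 and cur >= 28):
--             reset_hits += 1
--             streak = 0
--         else:
--             streak = 0
--         longest_streak = max(longest_streak, streak)
--     return descending_pairs, reset_hits, longest_streak
--
--
-- def _count_descending_pairs(numbers):
--     state = (0, 0, 0)
--     for seg in _split_segments(numbers):
--         state = _scan_segment(state, seg)
--     return state
-- ===== Notes on version B (the rewrite author's own statement) =====
-- stated objective: alternative
-- what changed: A is one stateful pass carrying previous_number/current_streak with inline resets; B first materializes the maximal runs of consecutive ints (splitting on every non-int) and then folds a pairwise scan over zip(seg, seg[1:]) within each segment, carrying only the three accumulators across segments.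
import Mathlib
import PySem

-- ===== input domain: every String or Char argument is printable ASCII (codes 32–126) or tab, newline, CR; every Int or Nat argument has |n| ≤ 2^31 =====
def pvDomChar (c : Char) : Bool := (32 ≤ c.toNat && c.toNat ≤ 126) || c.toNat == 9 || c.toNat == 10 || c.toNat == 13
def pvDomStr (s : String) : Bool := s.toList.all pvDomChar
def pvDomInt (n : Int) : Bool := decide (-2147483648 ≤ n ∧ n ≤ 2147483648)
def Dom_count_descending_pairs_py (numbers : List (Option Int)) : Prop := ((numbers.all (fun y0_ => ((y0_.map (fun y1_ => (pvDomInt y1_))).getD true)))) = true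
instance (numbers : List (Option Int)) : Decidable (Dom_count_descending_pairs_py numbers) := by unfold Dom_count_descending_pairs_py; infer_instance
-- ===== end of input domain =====

-- B restructures A's single stateful pass into "split into maximal int-runs, then pairwise-scan each run"; same cost, alternative decomposition.

-- ===== PORT A =====
-- loop body of A's single for-loop; state = (descending_pairs, reset_hits, longest_streak, current_streak, previous_number)
def pvStepA (s : Int × Int × Int × Int × Option Int) (number : Option Int) :
    Int × Int × Int × Int × Option Int :=
  match s with
  | (dp, rh, ls, cs, prev) =>
    match number with
    | none => (dp, rh, ls, 0, none)
    | some n =>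
      match prev with
      | none => (dp, rh, max ls cs, cs, some n)
      | some p =>
        if 1 ≤ p - n ∧ p - n ≤ 2 then
          (dp + 1, rh, max ls (cs + 1), cs + 1, some n)
        else if n ≥ p + 6 ∨ (p ≤ 3 ∧ n ≥ 28) then
          (dp, rh + 1, max ls 0, 0, some n)
        else
          (dp, rh, max ls 0, 0, some n)

def count_descending_pairs_py (numbers : List (Option Int)) : Int × Int × Int :=
  match numbers.foldl pvStepA (0, 0, 0, 0, none) with
  | (dp, rh, ls, _, _) => (dp, rh, ls)

-- ===== PORT B =====
-- _split_segments: fold carrying (finished segments, current run), flushed at the end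
def pvSegStep (acc : List (List Int) × List Int) (x : Option Int) : List (List Int) × List Int :=
  match x with
  | some n => (acc.1, acc.2 ++ [n])
  | none => (if acc.2 = [] then acc.1 else acc.1 ++ [acc.2], [])

def pvSegments (numbers : List (Option Int)) : List (List Int) :=
  match numbers.foldl pvSegStep ([], []) with
  | (segs, cur) => if cur = [] then segs else segs ++ [cur]

-- _scan_segment's loop body over one zip pair; state = (descending_pairs, reset_hits, longest_streak, streak)
def pvPairStep (st : Int × Int × Int × Int) (pr : Int × Int) : Int × Int × Int × Int :=
  match st, pr with
  | (dp, rh, lg, sk), (p, c) =>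
    if 1 ≤ p - c ∧ p - c ≤ 2 then (dp + 1, rh, max lg (sk + 1), sk + 1)
    else if c ≥ p + 6 ∨ (p ≤ 3 ∧ c ≥ 28) then (dp, rh + 1, max lg 0, 0)
    else (dp, rh, max lg 0, 0)

def pvScanSeg (st : Int × Int × Int) (seg : List Int) : Int × Int × Int :=
  match (seg.zip seg.tail).foldl pvPairStep (st.1, st.2.1, st.2.2, 0) with
  | (dp, rh, lg, _) => (dp, rh, lg)

def count_descending_pairs_py_alt (numbers : List (Option Int)) : Int × Int × Int :=
  (pvSegments numbers).foldl pvScanSeg (0, 0, 0)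

-- ===== PRECONDITION & SPEC =====
def Spec_count_descending_pairs_py (numbers : List (Option Int)) (out : Int × Int × Int) : Prop := out = count_descending_pairs_py_alt numbers
instance (numbers : List (Option Int)) (out : Int × Int × Int) : Decidable (Spec_count_descending_pairs_py numbers out) := by unfold Spec_count_descending_pairs_py; infer_instance

-- ===== CLAIM (what is proved, stated in full; the proofs are below) =====
def Claim_equal_count_descending_pairs_py : Prop := ∀ (numbers : List (Option Int)), Dom_count_descending_pairs_py numbers → Spec_count_descending_pairs_py numbers (count_descending_pairs_py numbers)

-- ===== LEMMAS AND PROOFS =====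

def pvFlush (r : List (List Int) × List Int) : List (List Int) :=
  if r.2 = [] then r.1 else r.1 ++ [r.2]

def pvTriple (s : Int × Int × Int × Int × Option Int) : Int × Int × Int := (s.1, s.2.1, s.2.2.1)

def pvTriple4 (s : Int × Int × Int × Int) : Int × Int × Int := (s.1, s.2.1, s.2.2.1)

-- recursive characterization of the segment splitter
def pvSegsR (cur : List Int) : List (Option Int) → List (List Int)
  | [] => if cur = [] then [] else [cur]
  | none :: xs => if cur = [] then pvSegsR [] xs else cur :: pvSegsR [] xs
  | some n :: xs => pvSegsR (cur ++ [n]) xs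

lemma pvSegFold (xs : List (Option Int)) : ∀ (segs : List (List Int)) (cur : List Int),
    pvFlush (xs.foldl pvSegStep (segs, cur)) = segs ++ pvSegsR cur xs := by
  induction xs with
  | nil => intro segs cur; simp only [List.foldl_nil, pvFlush, pvSegsR]; split_ifs <;> simp
  | cons x xs ih =>
    intro segs cur
    cases x with
    | none =>
      simp only [List.foldl_cons, pvSegStep, pvSegsR]
      rw [ih]
      split_ifs <;> simp
    | some n =>
      simp only [List.foldl_cons, pvSegStep, pvSegsR]
      exact ih segs (cur ++ [n])

lemma pvSegments_eq (xs : List (Option Int)) : pvSegments xs = pvSegsR [] xs := by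
  have h := pvSegFold xs [] []
  simp only [pvFlush] at h
  simp only [pvSegments]
  rcases hr : xs.foldl pvSegStep ([], []) with ⟨s, c⟩
  rw [hr] at h
  simpa using h

-- pair scan as structural recursion carrying the previous element
def pvPairsRun (st : Int × Int × Int × Int) (p : Int) : List Int → Int × Int × Int × Int
  | [] => st
  | c :: rest => pvPairsRun (pvPairStep st (p, c)) c rest

def pvLastOf (c : Int) : List Int → Int
  | [] => c
  | x :: xs => pvLastOf x xs

lemma pvZipFold (rest : List Int) : ∀ (p : Int) (st : Int × Int × Int × Int),
    ((p :: rest).zip rest).foldl pvPairStep st = pvPairsRun st p rest := by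
  induction rest with
  | nil => intro p st; simp [pvPairsRun]
  | cons c rest ih =>
    intro p st
    simp only [List.zip_cons_cons, List.foldl_cons, pvPairsRun]
    exact ih c _

lemma pvScanSeg_cons (st : Int × Int × Int) (p : Int) (rest : List Int) :
    pvScanSeg st (p :: rest) = pvTriple4 (pvPairsRun (st.1, st.2.1, st.2.2, 0) p rest) := by
  simp only [pvScanSeg, List.tail_cons, pvZipFold]
  rcases pvPairsRun (st.1, st.2.1, st.2.2, 0) p rest with ⟨a, b, c, d⟩
  rfl

lemma pvPairsRun_snoc (cs : List Int) : ∀ (st : Int × Int × Int × Int) (c0 n : Int),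
    pvPairsRun st c0 (cs ++ [n]) = pvPairStep (pvPairsRun st c0 cs) (pvLastOf c0 cs, n) := by
  induction cs with
  | nil => intro st c0 n; simp [pvPairsRun, pvLastOf]
  | cons c cs ih => intro st c0 n; simp only [List.cons_append, pvPairsRun, pvLastOf]; exact ih _ c n

lemma pvLastOf_snoc (cs : List Int) : ∀ (c0 n : Int), pvLastOf c0 (cs ++ [n]) = n := by
  induction cs with
  | nil => intro c0 n; rfl
  | cons c cs ih => intro c0 n; simp only [List.cons_append, pvLastOf]; exact ih c n

-- B's computation continued from inside a segment
def pvInRun (st : Int × Int × Int × Int) (prev : Int) : List (Option Int) → Int × Int × Int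
  | [] => pvTriple4 st
  | none :: xs => (pvSegsR [] xs).foldl pvScanSeg (pvTriple4 st)
  | some n :: xs => pvInRun (pvPairStep st (prev, n)) n xs

-- bridge: continuing inside a partially scanned segment equals folding over the materialized segments
lemma pvPart (xs : List (Option Int)) : ∀ (base : Int × Int × Int) (c0 : Int) (cs : List Int),
    pvInRun (pvPairsRun (base.1, base.2.1, base.2.2, 0) c0 cs) (pvLastOf c0 cs) xs =
      (pvSegsR (c0 :: cs) xs).foldl pvScanSeg base := by
  induction xs with
  | nil =>
    intro base c0 cs
    have h : (c0 :: cs : List Int) ≠ [] := by simp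
    simp only [pvSegsR, pvInRun, if_neg h, List.foldl_cons, List.foldl_nil, pvScanSeg_cons]
  | cons x xs ih =>
    intro base c0 cs
    cases x with
    | none =>
      have h : (c0 :: cs : List Int) ≠ [] := by simp
      simp only [pvSegsR, pvInRun, if_neg h, List.foldl_cons, pvScanSeg_cons]
    | some n =>
      simp only [pvSegsR, pvInRun]
      have h := ih base c0 (cs ++ [n])
      rw [pvPairsRun_snoc, pvLastOf_snoc] at h
      exact h

-- A's step inside a segment matches B's pair step (with previous_number re-pinned)
lemma pvStepA_some_some (dp rh lg sk p n : Int) :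
    pvStepA (dp, rh, lg, sk, some p) (some n) =
      ((pvPairStep (dp, rh, lg, sk) (p, n)).1, (pvPairStep (dp, rh, lg, sk) (p, n)).2.1,
       (pvPairStep (dp, rh, lg, sk) (p, n)).2.2.1, (pvPairStep (dp, rh, lg, sk) (p, n)).2.2.2, some n) := by
  simp only [pvStepA, pvPairStep]
  split_ifs <;> rfl

-- main induction: A's fold equals B's segment fold, in both "between segments" and "inside a segment" modes
lemma pvMain (xs : List (Option Int)) :
    (∀ (dp rh lg : Int), 0 ≤ lg →
      pvTriple (xs.foldl pvStepA (dp, rh, lg, 0, none)) = (pvSegsR [] xs).foldl pvScanSeg (dp, rh, lg)) ∧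
    (∀ (dp rh lg sk : Int) (prev : Int), 0 ≤ lg → 0 ≤ sk →
      pvTriple (xs.foldl pvStepA (dp, rh, lg, sk, some prev)) = pvInRun (dp, rh, lg, sk) prev xs) := by
  induction xs with
  | nil =>
    exact ⟨fun dp rh lg _ => by simp [pvSegsR, pvTriple],
           fun dp rh lg sk prev _ _ => by simp [pvInRun, pvTriple, pvTriple4]⟩
  | cons x xs ih =>
    constructor
    · intro dp rh lg hlg
      cases x with
      | none =>
        simp only [List.foldl_cons, pvStepA, pvSegsR, if_pos]
        exact ih.1 dp rh lg hlg
      | some n =>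
        simp only [List.foldl_cons, pvStepA, pvSegsR]
        rw [max_eq_left hlg]
        rw [ih.2 dp rh lg 0 n hlg le_rfl]
        have h := pvPart xs (dp, rh, lg) n []
        simpa [pvPairsRun, pvLastOf] using h
    · intro dp rh lg sk prev hlg hsk
      cases x with
      | none =>
        simp only [List.foldl_cons, pvStepA, pvInRun, pvTriple4]
        exact ih.1 dp rh lg hlg
      | some n =>
        simp only [List.foldl_cons, pvInRun]
        rw [pvStepA_some_some]
        rcases hp : pvPairStep (dp, rh, lg, sk) (prev, n) with ⟨dp2, rh2, lg2, sk2⟩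
        have hb : 0 ≤ lg2 ∧ 0 ≤ sk2 := by
          simp only [pvPairStep] at hp
          split_ifs at hp <;>
            (injection hp with h1 h2; injection h2 with h2 h3; injection h3 with h3 h4;
             subst h3; subst h4; exact ⟨le_trans hlg (le_max_left _ _), by omega⟩)
        exact ih.2 dp2 rh2 lg2 sk2 n hb.1 hb.2

-- projections of the two ports
lemma pvPortA_eq (xs : List (Option Int)) :
    count_descending_pairs_py xs = pvTriple (xs.foldl pvStepA (0, 0, 0, 0, none)) := by
  simp only [count_descending_pairs_py]
  rcases xs.foldl pvStepA (0, 0, 0, 0, none) with ⟨a, b, c, d, e⟩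
  rfl

-- ===== VERDICT (by name: the statement is the Claim_ definition above) =====
theorem count_descending_pairs_py_spec : Claim_equal_count_descending_pairs_py := by
  intro numbers _
  unfold Spec_count_descending_pairs_py count_descending_pairs_py_alt
  rw [pvPortA_eq, pvSegments_eq]
  exact (pvMain numbers).1 0 0 0 le_rfl
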